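-- pv_equiv track=rewrite | github.com/shraga89/ExplainDaV | Explain-Da-V/Foofah/foofah_libs/operators.py | f_unfold
-- ===== SOURCE A (Python) =====
-- from collections import OrderedDict
--
-- def f_unfold(table):
--     new_table = []
--
--     if not isinstance(table[0], list):
--         return []
--
--     if len(table[0]) < 1:
--         return table
--
--     temp = OrderedDict()
--
--     for row in table:
--         t = tuple(row[:-1])
--         if t in list(temp.keys()):
--             temp[t].append(row[-1])
--         else:
--             temp[t] = [row[-1]]
--
--     max_col = 0
--     for key, value in list(temp.items()):
--         if len(value) > max_col:
--             max_col = len(value)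
--
--     for key, value in list(temp.items()):
--         temp_row = list(key) + value
--
--         for i in range(max_col - len(value)):
--             temp_row.append("")
--
--         new_table.append(temp_row)
--
--     return new_table
-- ===== SOURCE B (Python) =====
-- def f_unfold(table):
--     if not isinstance(table[0], list):
--         return []
--
--     if len(table[0]) < 1:
--         return table
--
--     keys = list(dict.fromkeys(tuple(r[:-1]) for r in table))
--     groups = [[r[-1] for r in table if tuple(r[:-1]) == k] for k in keys]
--     width = max(len(g) for g in groups)
--     return [list(k) + g + [""] * (width - len(g)) for k, g in zip(keys, groups)]
-- ===== Notes on version B (the rewrite author's own statement) =====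
-- stated objective: alternative
-- what changed: A's single-pass ordered-dict accumulation (per-row membership scan of list(temp.keys()), then a max loop and per-row padding appends) is replaced by staged passes: an ordered key dedup via dict.fromkeys, a per-key filter comprehension gathering last elements, and zip-based row assembly with arithmetic padding.
import Mathlib
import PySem

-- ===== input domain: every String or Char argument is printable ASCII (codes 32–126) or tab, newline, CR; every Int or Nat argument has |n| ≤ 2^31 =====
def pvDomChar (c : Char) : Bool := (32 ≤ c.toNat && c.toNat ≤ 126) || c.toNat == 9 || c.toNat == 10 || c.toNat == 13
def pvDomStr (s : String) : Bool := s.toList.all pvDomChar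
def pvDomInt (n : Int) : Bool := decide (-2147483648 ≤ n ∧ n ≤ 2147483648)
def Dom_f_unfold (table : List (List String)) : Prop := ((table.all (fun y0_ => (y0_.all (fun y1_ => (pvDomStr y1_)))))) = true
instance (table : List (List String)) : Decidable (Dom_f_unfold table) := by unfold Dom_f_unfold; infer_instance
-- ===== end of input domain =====

-- B replaces A's single-pass ordered-dict accumulation by staged passes: an ordered key dedup,
-- a per-key filter pass gathering the last elements, then zip-based row assembly (objective: alternative).

-- ===== PORT A =====
-- Under the type convention table[0] is always a list, so the isinstance branch never fires;
-- table[0] itself raises IndexError on [], excluded by Pre_ (the [] arm is a totality fallback).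
-- row[:-1] is exactly List.dropLast; row[-1] is List.getLastD "" on the nonempty rows Pre_ admits;
-- temp[t].append(x) on an existing key sets temp[t] = temp.get(t, []) + [x], i.e. Dict.modify.
def f_unfold (table : List (List String)) : List (List String) :=
  match table with
  | [] => []
  | r0 :: _ =>
    if r0.length < 1 then table
    else
      let temp : PySem.Dict (List String) (List String) :=
        table.foldl (fun d row =>
          if d.keys.contains row.dropLast then
            d.modify row.dropLast [] (fun l => l ++ [row.getLastD ""])
          else d.insert row.dropLast [row.getLastD ""]) PySem.Dict.empty
      let maxCol : Nat :=
        temp.items.foldl (fun m p => if p.2.length > m then p.2.length else m) 0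
      temp.items.foldl (fun nt p =>
        nt ++ [(List.range (maxCol - p.2.length)).foldl (fun r _ => r ++ [""]) (p.1 ++ p.2)]) []

-- ===== PORT B =====
-- list(dict.fromkeys(...)) — first occurrences in order — is PySem.List.dedup; the per-key list
-- comprehension with the '==' filter is List.filter then List.map; max(...) over a nonempty iterable is
-- PySem.List.max? (the .getD 0 is a totality fallback, unreachable under Pre_); [""] * k is List.replicate;
-- zip(keys, groups) is List.zip.
def f_unfold_alt (table : List (List String)) : List (List String) :=
  match table with
  | [] => []
  | r0 :: _ =>
    if r0.length < 1 then table
    else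
      let keys : List (List String) := PySem.List.dedup (table.map (·.dropLast))
      let groups : List (List String) :=
        keys.map (fun k => (table.filter (fun r => r.dropLast == k)).map (·.getLastD ""))
      let width : Nat := (PySem.List.max? (groups.map (·.length)) (fun y => y)).getD 0
      (keys.zip groups).map (fun p => p.1 ++ p.2 ++ List.replicate (width - p.2.length) "")

-- ===== PRECONDITION & SPEC =====
-- Pre_ excludes exactly the inputs where the Python raises IndexError: the empty table (table[0]),
-- and tables whose first row is nonempty but that contain an empty row (row[-1] in the grouping pass).
def Pre_f_unfold (table : List (List String)) : Prop :=
  table ≠ [] ∧ (table.headI = [] ∨ ∀ r ∈ table, r ≠ [])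
instance (table : List (List String)) : Decidable (Pre_f_unfold table) := by
  unfold Pre_f_unfold; infer_instance

def pvWitness_f_unfold : List (List String) := [["a", "1"], ["a", "2"], ["b", "3"]]

def Spec_f_unfold (table : List (List String)) (out : List (List String)) : Prop := out = f_unfold_alt table
instance (table : List (List String)) (out : List (List String)) : Decidable (Spec_f_unfold table out) := by unfold Spec_f_unfold; infer_instance

-- ===== CLAIM (what is proved, stated in full; the proofs are below) =====
def Claim_equal_f_unfold : Prop := ∀ (table : List (List String)), Dom_f_unfold table → Pre_f_unfold table → Spec_f_unfold table (f_unfold table)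

-- ===== LEMMAS AND PROOFS =====

-- A's per-row branch (membership test, then append or fresh insert) equals the unconditional modify step.
lemma step_eq (d : PySem.Dict (List String) (List String)) (t : List String) (x : String) :
    (if d.keys.contains t then d.modify t [] (fun l => l ++ [x]) else d.insert t [x])
      = d.modify t [] (fun l => l ++ [x]) := by
  by_cases h : d.keys.contains t
  · rw [if_pos h]
  · rw [if_neg h]
    have hc : d.contains t = false := by
      rw [PySem.Dict.contains_eq_decide_mem_keys]; simpa using h
    simp [PySem.Dict.modify, PySem.Dict.getD_of_not_contains d _ hc]

-- A's grouping dict, characterised: its items are B's deduped keys paired with B's filtered groups.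
lemma items_group (table : List (List String)) :
    (table.foldl (fun d row =>
        d.modify row.dropLast [] (fun l => l ++ [row.getLastD ""])) PySem.Dict.empty).items
      = (PySem.List.dedup (table.map (·.dropLast))).map
          (fun k => (k, (table.filter (fun r => r.dropLast == k)).map (·.getLastD ""))) := by
  set D := table.foldl (fun d row =>
      d.modify row.dropLast [] (fun l => l ++ [row.getLastD ""])) PySem.Dict.empty with hD
  have hnd : D.keys.Nodup := by
    rw [hD]
    exact PySem.Dict.nodup_keys_foldl_modify_key table (·.dropLast) []
      (fun _ row => fun l => l ++ [row.getLastD ""]) PySem.Dict.empty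
      (by simp [PySem.Dict.keys, PySem.Dict.empty])
  rw [PySem.Dict.items_eq_map_keys D hnd []]
  have hkeys : D.keys = PySem.List.dedup (table.map (·.dropLast)) := by
    rw [hD, PySem.Dict.keys_foldl_modify_key]
    simp [PySem.Set.update, PySem.Set.ofList_eq_foldl, PySem.Dict.keys, PySem.Dict.empty]
  rw [hkeys]
  apply List.map_congr_left
  intro k _
  congr 1
  have hfold : D = (table.map (fun r => (r.dropLast, r.getLastD ""))).foldl
      (fun d p => d.modify p.1 [] (fun l => l ++ [p.2])) PySem.Dict.empty := by
    rw [hD, List.foldl_map]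
  rw [hfold, PySem.Dict.getD_foldl_modify_append]
  simp [List.filter_map, Function.comp_def, PySem.Dict.getD, PySem.Dict.get?, PySem.Dict.empty]

-- A's running-max-by-comparison loop is the foldl-max of the projections.
lemma fold_if_max {α : Type} (l : List α) (f : α → Nat) (a : Nat) :
    l.foldl (fun m p => if f p > m then f p else m) a = (l.map f).foldl max a := by
  induction l generalizing a with
  | nil => rfl
  | cons h t ih =>
    simp only [List.foldl_cons, List.map_cons, ih]
    congr 1
    rw [Nat.max_def]
    split_ifs <;> omega

-- A's padding loop over range(n) appends n empty strings.
lemma range_pad (n : Nat) (base : List String) :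
    (List.range n).foldl (fun r _ => r ++ [""]) base = base ++ List.replicate n "" := by
  induction n generalizing base with
  | zero => simp
  | succ k ih => simp [List.range_succ, List.foldl_append, ih, List.replicate_succ', List.append_assoc]

-- foldl max 0 agrees with Python's max() (first-extremal max?) on Nat lists, with default 0 on [].
lemma max_getD (L : List Nat) :
    L.foldl max 0 = (PySem.List.max? L (fun y => y)).getD 0 := by
  cases L with
  | nil => simp [PySem.List.max?]
  | cons x t => rw [PySem.List.max?_id_cons]; simp

-- zip of a list with its own map is the map of the pairing.
lemma zip_self_map {α β : Type} (l : List α) (g : α → β) :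
    l.zip (l.map g) = l.map (fun x => (x, g x)) := by
  have := List.zip_map' (l := l) (f := fun x : α => x) (g := g)
  simpa using this

-- ===== VERDICT (by name: the statement is the Claim_ definition above) =====
theorem f_unfold_spec : Claim_equal_f_unfold := by
  intro table _ _
  unfold Spec_f_unfold
  cases table with
  | nil => rfl
  | cons r0 rest =>
    by_cases h0 : r0.length < 1
    · simp [f_unfold, f_unfold_alt, h0]
    · simp only [f_unfold, f_unfold_alt, if_neg h0]
      have hd : (r0 :: rest).foldl (fun d row =>
            if d.keys.contains row.dropLast then
              d.modify row.dropLast [] (fun l => l ++ [row.getLastD ""])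
            else d.insert row.dropLast [row.getLastD ""]) PySem.Dict.empty
          = (r0 :: rest).foldl (fun d row =>
              d.modify row.dropLast [] (fun l => l ++ [row.getLastD ""])) PySem.Dict.empty := by
        apply PySem.List.foldl_congr_mem
        intro acc x _
        exact step_eq acc x.dropLast (x.getLastD "")
      rw [hd, items_group]
      rw [zip_self_map]
      rw [PySem.List.foldl_append_singleton_eq_map]
      simp only [List.nil_append, List.map_map, Function.comp_def, fold_if_max, max_getD,
        List.map_map, range_pad, List.append_assoc]
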